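-- pv_equiv track=rewrite | github.com/723poil/boj | 프로그래머스/unrated/150367. 표현 가능한 이진트리/표현 가능한 이진트리.py | solution
-- ===== SOURCE A (Python) =====
-- from collections import deque
--
-- def solution(numbers):
-- #이진수를 저장할 빈 문자열을 생성합니다.
--     answer = []
--
--     def make_full_binary(binary):
--         n = 1
--         bn = len(binary)
--         # 1 - 3 - 7 - 15 - 31 - 63
--         while bn > n:
--             n += (n+1)
--
--         for _ in range(n - bn):
--             binary = '0' + binary
--
--         return binary
--
-- #주어진 이진트리에 더미 노드를 추가하여 포화 이진트리로 만듭니다. 루트 노드는 그대로 유지합니다.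
--     for number in numbers:
--         binary_number = bin(number).lstrip("0b")
--         binary_number = make_full_binary(binary_number)
--
--         root_idx = len(binary_number) // 2
--         isBinary = True
--
--         queue = deque()
--         queue.append([0, root_idx, len(binary_number)-1])
--
--         while queue and isBinary:
--             start, mid, end = queue.pop()
--
--             next_left_mid = (start+mid-1)//2
--             next_right_mid = (mid+end+1)//2
--
--
--             if (binary_number[next_left_mid] == '1' or binary_number[next_right_mid] == '1') and binary_number[mid] != '1':
--                 isBinary = False
--                 break
--             else:
--                 if end - start > 2:
--                     queue.appendleft([start, next_left_mid, mid-1])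
--                     queue.appendleft([mid+1, next_right_mid, end])
--         if isBinary:
--             answer.append(1)
--         else:
--             answer.append(0)
--
--     return answer
-- ===== SOURCE B (Python) =====
-- def solution(numbers):
--     def make_full_binary(binary):
--         n = 1
--         bn = len(binary)
--         while bn > n:
--             n += (n+1)
--         for _ in range(n - bn):
--             binary = '0' + binary
--         return binary
--
--     def check(s):
--         if len(s) <= 1:
--             return True
--         mid = len(s) // 2
--         left = s[:mid]
--         right = s[mid+1:]
--         if s[mid] != '1' and (left[len(left)//2] == '1' or right[len(right)//2] == '1'):
--             return False
--         return check(left) and check(right)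
--
--     return [1 if check(make_full_binary(bin(number).lstrip("0b"))) else 0
--             for number in numbers]
-- ===== Notes on version B (the rewrite author's own statement) =====
-- stated objective: simpler
-- what changed: Replaced the explicit deque-driven breadth-first loop with mid-index bookkeeping by a short recursive divide-and-conquer check on string slices; conversion and padding are unchanged, and the whole function becomes a comprehension.
import Mathlib
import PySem

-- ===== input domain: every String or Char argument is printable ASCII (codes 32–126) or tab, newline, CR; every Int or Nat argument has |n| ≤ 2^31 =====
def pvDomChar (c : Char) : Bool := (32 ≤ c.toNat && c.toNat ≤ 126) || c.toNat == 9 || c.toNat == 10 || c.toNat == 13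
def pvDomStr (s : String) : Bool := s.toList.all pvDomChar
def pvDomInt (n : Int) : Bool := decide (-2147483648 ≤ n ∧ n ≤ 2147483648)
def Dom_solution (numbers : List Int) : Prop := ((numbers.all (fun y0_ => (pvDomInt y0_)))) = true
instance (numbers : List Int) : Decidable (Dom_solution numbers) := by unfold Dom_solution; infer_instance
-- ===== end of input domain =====

-- B replaces A's deque-driven breadth-first scan by a recursive divide-and-conquer check; same conversion and padding, same return values.

-- ===== PORT A =====
-- shared helper (the conversion/padding code is textually identical in Source A and Source B):
-- while bn > n: n += (n+1)
def fullLen (bn n : Nat) : Nat :=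
  if n < bn then fullLen bn (n + (n + 1)) else n
termination_by bn - n
decreasing_by omega

-- make_full_binary: pad with '0' on the left, `for _ in range(n - bn): binary = '0' + binary`
def mkFull (binary : List Char) : List Char :=
  let n := fullLen binary.length 1
  (PySem.List.pyRange 0 ((n : Int) - (binary.length : Int)) 1).foldl (fun b _ => '0' :: b) binary

-- bin(number).lstrip("0b") then make_full_binary (lstrip drops leading chars in {'0','b'}: exactly dropWhile)
def toFull (number : Int) : List Char :=
  mkFull ((PySem.Int.toBinChars0b number).dropWhile (fun c => c == '0' || c == 'b'))

-- the while-loop over the deque; queue listed in pop order (head = next pop(), appendleft = push at tail).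
-- fuel only makes the recursion total; it is never exhausted on a real call (proved via the cost bound below).
-- string indexing via pyGet?: `== some '1'` — `none` (IndexError) never occurs on a real call.
def loopA (b : List Char) (q : List (Int × Int × Int)) (fuel : Nat) : Bool :=
  match fuel, q with
  | 0, _ => true
  | _ + 1, [] => true
  | f + 1, (s, m, e) :: rest =>
    let nlm := PySem.Int.floordiv (s + m - 1) 2
    let nrm := PySem.Int.floordiv (m + e + 1) 2
    if (PySem.List.pyGet? b nlm == some '1' || PySem.List.pyGet? b nrm == some '1')
        && !(PySem.List.pyGet? b m == some '1') then false
    else loopA b (if e - s > 2 then rest ++ [(s, nlm, m - 1), (m + 1, nrm, e)] else rest) f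

def solution (numbers : List Int) : List Int :=
  numbers.foldl (fun answer number =>
    let bn := toFull number
    let rootIdx := PySem.Int.floordiv (PySem.List.len bn) 2
    answer ++ [if loopA bn [(0, rootIdx, PySem.List.len bn - 1)] bn.length then 1 else 0]) []

-- ===== PORT B =====
-- recursive divide-and-conquer check (Source B's `check`); `len(s) <= 1` guard keeps it total (len 0 never occurs)
def checkB (s : List Char) : Bool :=
  if s.length ≤ 1 then true
  else
    let mid := s.length / 2
    let left := PySem.List.slice s none (some (mid : Int))
    let right := PySem.List.slice s (some ((mid : Int) + 1)) none
    if !(PySem.List.pyGet? s (mid : Int) == some '1')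
        && (PySem.List.pyGet? left ((left.length / 2 : Nat) : Int) == some '1'
            || PySem.List.pyGet? right ((right.length / 2 : Nat) : Int) == some '1') then false
    else checkB left && checkB right
termination_by s.length
decreasing_by
  · simp only [PySem.List.slice_to_natCast, List.length_take]; omega
  · have : ((s.length / 2 : Nat) : Int) + 1 = ((s.length / 2 + 1 : Nat) : Int) := by push_cast; ring
    rw [this, PySem.List.slice_from_natCast]
    simp only [List.length_drop]; omega

def solution_alt (numbers : List Int) : List Int :=
  numbers.map (fun number => if checkB (toFull number) then 1 else 0)

-- ===== PRECONDITION & SPEC =====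
def Spec_solution (numbers : List Int) (out : List Int) : Prop := out = solution_alt numbers
instance (numbers : List Int) (out : List Int) : Decidable (Spec_solution numbers out) := by unfold Spec_solution; infer_instance

-- ===== CLAIM (what is proved, stated in full; the proofs are below) =====
def Claim_equal_solution : Prop := ∀ (numbers : List Int), Dom_solution numbers → Spec_solution numbers (solution numbers)

-- ===== LEMMAS AND PROOFS =====

-- the node condition A tests (with the mids it computes)
def condA (b : List Char) (s m e : Int) : Bool :=
  (PySem.List.pyGet? b (PySem.Int.floordiv (s + m - 1) 2) == some '1'
    || PySem.List.pyGet? b (PySem.Int.floordiv (m + e + 1) 2) == some '1')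
    && !(PySem.List.pyGet? b m == some '1')

-- the whole-subtree check, order-free
def goodA (b : List Char) (s e : Int) : Bool :=
  let m := PySem.Int.floordiv (s + e) 2
  if e - s > 2 then
    !condA b s m e && (goodA b s (m - 1) && goodA b (m + 1) e)
  else !condA b s m e
termination_by (e - s).toNat
decreasing_by
  · have := PySem.Int.floordiv_two_mid_bounds (lo := s) (hi := e) (by omega)
    omega
  · have := PySem.Int.floordiv_two_mid_bounds (lo := s) (hi := e) (by omega)
    omega

-- number of iterations the deque loop spends on a node
def costA (s e : Int) : Nat :=
  let m := PySem.Int.floordiv (s + e) 2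
  if e - s > 2 then 1 + costA s (m - 1) + costA (m + 1) e else 1
termination_by (e - s).toNat
decreasing_by
  · have := PySem.Int.floordiv_two_mid_bounds (lo := s) (hi := e) (by omega)
    omega
  · have := PySem.Int.floordiv_two_mid_bounds (lo := s) (hi := e) (by omega)
    omega

lemma costA_pos (s e : Int) : 1 ≤ costA s e := by
  rw [costA]; split <;> omega

lemma costA_le (s e : Int) (h : s ≤ e) : costA s e ≤ (e - s).toNat + 1 := by
  fun_induction costA s e with
  | case1 s e m hgt ih1 ih2 =>
    have hb := PySem.Int.floordiv_two_mid_bounds (lo := s + 1) (hi := e - 1) (by omega)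
    have he : s + 1 + (e - 1) = s + e := by ring
    rw [he] at hb
    have h1 := ih1 (by omega)
    have h2 := ih2 (by omega)
    omega
  | case2 => omega

def sumCost (q : List (Int × Int × Int)) : Nat :=
  (q.map (fun x => costA x.1 x.2.2)).sum

def invQ (q : List (Int × Int × Int)) : Prop :=
  ∀ x ∈ q, x.2.1 = PySem.Int.floordiv (x.1 + x.2.2) 2 ∧ x.1 ≤ x.2.2

lemma goodA_of_cond_false (b : List Char) (s m e : Int) (hm : m = PySem.Int.floordiv (s + e) 2)
    (hc : condA b s m e = false) :
    goodA b s e = (if e - s > 2 then goodA b s (m - 1) && goodA b (m + 1) e else true) := by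
  rw [goodA, ← hm, hc]; split <;> simp

lemma goodA_of_cond_true (b : List Char) (s m e : Int) (hm : m = PySem.Int.floordiv (s + e) 2)
    (hc : condA b s m e = true) : goodA b s e = false := by
  rw [goodA, ← hm, hc]; split <;> simp

lemma loopA_eq_all (f : Nat) : ∀ (b : List Char) (q : List (Int × Int × Int)),
    invQ q → sumCost q ≤ f → loopA b q f = q.all (fun x => goodA b x.1 x.2.2) := by
  induction f with
  | zero =>
    intro b q hinv hcost
    match q with
    | [] => rfl
    | x :: rest =>
      exfalso
      have := costA_pos x.1 x.2.2
      simp only [sumCost, List.map_cons, List.sum_cons] at hcost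
      omega
  | succ f ih =>
    intro b q hinv hcost
    match q with
    | [] => rfl
    | (s, m, e) :: rest =>
      obtain ⟨hm, hse⟩ := hinv (s, m, e) (List.mem_cons_self ..)
      simp only at hm hse
      have hrest : invQ rest := fun x hx => hinv x (List.mem_cons_of_mem _ hx)
      show (if condA b s m e then false
            else loopA b (if e - s > 2 then
              rest ++ [(s, PySem.Int.floordiv (s + m - 1) 2, m - 1),
                       (m + 1, PySem.Int.floordiv (m + e + 1) 2, e)] else rest) f)
          = ((s, m, e) :: rest).all (fun x => goodA b x.1 x.2.2)
      simp only [sumCost, List.map_cons, List.sum_cons] at hcost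
      by_cases hc : condA b s m e = true
      · rw [if_pos hc, List.all_cons]
        simp only [goodA_of_cond_true b s m e hm hc, Bool.false_and]
      · rw [Bool.not_eq_true] at hc
        rw [if_neg (by simp [hc]), List.all_cons, goodA_of_cond_false b s m e hm hc]
        by_cases hgt : e - s > 2
        · have hb := PySem.Int.floordiv_two_mid_bounds (lo := s + 1) (hi := e - 1) (by omega)
          have he : s + 1 + (e - 1) = s + e := by ring
          rw [he] at hb; rw [← hm] at hb
          have hcA : costA s e = 1 + costA s (m - 1) + costA (m + 1) e := by
            rw [costA, ← hm, if_pos hgt]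
          have hinv' : invQ (rest ++ [(s, PySem.Int.floordiv (s + m - 1) 2, m - 1),
                       (m + 1, PySem.Int.floordiv (m + e + 1) 2, e)]) := by
            intro x hx
            rcases List.mem_append.mp hx with h | h
            · exact hrest x h
            · simp only [List.mem_cons, List.not_mem_nil, or_false] at h
              rcases h with rfl | rfl
              · exact ⟨by simp only; congr 1; ring, by simpa using hb.1⟩
              · exact ⟨by simp only; congr 1; ring, by simpa using hb.2⟩
          have hsum : sumCost (rest ++ [(s, PySem.Int.floordiv (s + m - 1) 2, m - 1),
                       (m + 1, PySem.Int.floordiv (m + e + 1) 2, e)]) ≤ f := by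
            simp only [sumCost, List.map_append, List.sum_append, List.map_cons,
              List.sum_cons, List.map_nil, List.sum_nil]
            omega
          rw [if_pos hgt, ih b _ hinv' hsum]
          rw [if_pos hgt, List.all_append]
          simp only [List.all_cons, List.all_nil]
          cases rest.all (fun x => goodA b x.1 x.2.2) <;>
            cases goodA b s (m - 1) <;> cases goodA b (m + 1) e <;> simp
        · rw [if_neg hgt, ih b rest hrest (by
            have := costA_pos s e
            simp only [sumCost]
            omega), if_neg hgt]
          simp

lemma fdiv2 (X Y : Int) (h : X = 2*Y ∨ X = 2*Y+1) : PySem.Int.floordiv X 2 = Y := by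
  rw [PySem.Int.floordiv_eq_ediv_of_pos (by omega)]; omega

lemma sub_getElem? (b : List Char) (sn n i : Nat) (hi : i < n) :
    ((b.drop sn).take n)[i]? = b[sn + i]? := by
  rw [List.getElem?_take, if_pos hi, List.getElem?_drop]

lemma pyGet?_cast_add (b : List Char) (sn j : Nat) :
    PySem.List.pyGet? b ((sn : Int) + (j : Int)) = b[sn + j]? := by
  rw [show ((sn:Int) + (j:Int)) = ((sn + j : Nat) : Int) by push_cast; ring, PySem.List.pyGet?_natCast]

lemma checkB_step (s : List Char) (h : ¬ s.length ≤ 1) :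
    checkB s = (if !(PySem.List.pyGet? s ((s.length / 2 : Nat) : Int) == some '1')
        && (PySem.List.pyGet? (s.take (s.length / 2)) (((s.take (s.length / 2)).length / 2 : Nat) : Int) == some '1'
            || PySem.List.pyGet? (s.drop (s.length / 2 + 1)) (((s.drop (s.length / 2 + 1)).length / 2 : Nat) : Int) == some '1') then false
    else checkB (s.take (s.length / 2)) && checkB (s.drop (s.length / 2 + 1))) := by
  have hc : ((s.length / 2 : Nat) : Int) + 1 = ((s.length / 2 + 1 : Nat) : Int) := by push_cast; ring
  rw [checkB, if_neg h]
  simp only [hc, PySem.List.slice_to_natCast, PySem.List.slice_from_natCast]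

lemma checkB_small (s : List Char) (h : s.length ≤ 1) : checkB s = true := by
  rw [checkB, if_pos h]

lemma checkB_three (s : List Char) (h : s.length = 3) :
    checkB s = !((s[0]? == some '1' || s[2]? == some '1') && !(s[1]? == some '1')) := by
  have hm2 : s.length / 2 = 1 := by omega
  rw [checkB_step _ (by omega), hm2]
  have ht : (s.take 1).length = 1 := by simp [h]
  have hd : (s.drop (1 + 1)).length = 1 := by simp [h]
  rw [ht, hd]
  have hz : ((1 / 2 : Nat) : Int) = 0 := by norm_num
  rw [hz, PySem.List.pyGet?_zero, PySem.List.pyGet?_zero]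
  have hone : PySem.List.pyGet? s ((1 : Nat) : Int) = s[1]? := PySem.List.pyGet?_natCast ..
  rw [hone, checkB_small _ (by omega), checkB_small _ (by omega)]
  have e0 : (s.take 1)[0]? = s[0]? := by rw [List.getElem?_take]; simp
  have e2 : (s.drop (1 + 1))[0]? = s[2]? := by rw [List.getElem?_drop]
  rw [e0, e2]
  cases hx : (s[0]? == some '1') <;> cases hy : (s[1]? == some '1') <;> cases hz2 : (s[2]? == some '1') <;>
    simp_all

lemma bridge (k : Nat) (hk : 2 ≤ k) : ∀ (sn : Nat) (b : List Char),
    sn + (2 ^ k - 1) ≤ b.length →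
    goodA b (sn : Int) ((sn : Int) + (2 ^ k : Int) - 2) = checkB ((b.drop sn).take (2 ^ k - 1)) := by
  induction k, hk using Nat.le_induction with
  | base =>
    intro sn b hlen
    rw [goodA, if_neg (by omega)]
    have hm : PySem.Int.floordiv ((sn:Int) + ((sn:Int) + 2^2 - 2)) 2 = (sn:Int) + 1 := fdiv2 _ _ (by norm_num; omega)
    rw [hm, condA]
    have hnlm : PySem.Int.floordiv ((sn:Int) + ((sn:Int) + 1) - 1) 2 = ((sn:Int) + (0:Nat)) := fdiv2 _ _ (by norm_num; omega)
    have hnrm : PySem.Int.floordiv (((sn:Int) + 1) + ((sn:Int) + 2^2 - 2) + 1) 2 = ((sn:Int) + (2:Nat)) := fdiv2 _ _ (by norm_num; omega)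
    rw [hnlm, hnrm, pyGet?_cast_add, pyGet?_cast_add]
    have h1 : PySem.List.pyGet? b ((sn:Int) + 1) = b[sn + 1]? := by
      rw [show ((sn:Int) + 1) = ((sn:Int) + ((1:Nat):Int)) by norm_num, pyGet?_cast_add]
    rw [h1]
    have hslen : ((b.drop sn).take (2^2 - 1)).length = 3 := by simp; omega
    rw [checkB_three _ hslen,
      sub_getElem? b sn _ 0 (by norm_num), sub_getElem? b sn _ 1 (by norm_num), sub_getElem? b sn _ 2 (by norm_num)]
  | succ k hk ih =>
    intro sn b hlen
    obtain ⟨u, hu, h2k⟩ : ∃ u, 2 ≤ u ∧ 2 ^ k = 2 * u := by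
      refine ⟨2 ^ (k - 1), ?_, ?_⟩
      · calc 2 = 2 ^ 1 := rfl
          _ ≤ 2 ^ (k - 1) := Nat.pow_le_pow_right (by omega) (by omega)
      · rw [← pow_succ']; congr 1; omega
    have h2k1 : 2 ^ (k + 1) = 4 * u := by rw [pow_succ]; omega
    have hIk : ((2 : Int)) ^ k = 2 * (u : Int) := by exact_mod_cast h2k
    have hI : ((2 : Int)) ^ (k + 1) = 4 * (u : Int) := by exact_mod_cast h2k1
    rw [hI, h2k1]
    rw [goodA, if_pos (by omega)]
    have hm : PySem.Int.floordiv ((sn:Int) + ((sn:Int) + 4 * (u:Int) - 2)) 2 = (sn:Int) + ((2*u - 1 : Nat) : Int) :=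
      fdiv2 _ _ (by omega)
    rw [hm, condA]
    have hnlm : PySem.Int.floordiv ((sn:Int) + ((sn:Int) + ((2*u - 1 : Nat) : Int)) - 1) 2
        = (sn:Int) + ((u - 1 : Nat) : Int) := fdiv2 _ _ (by omega)
    have hnrm : PySem.Int.floordiv (((sn:Int) + ((2*u - 1 : Nat) : Int)) + ((sn:Int) + 4 * (u:Int) - 2) + 1) 2
        = (sn:Int) + ((3*u - 1 : Nat) : Int) := fdiv2 _ _ (by omega)
    rw [hnlm, hnrm, pyGet?_cast_add, pyGet?_cast_add, pyGet?_cast_add]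
    have ihl := ih sn b (by omega)
    rw [show (sn:Int) + (2:Int)^k - 2 = ((sn:Int) + ((2*u - 1 : Nat) : Int)) - 1 by omega, h2k] at ihl
    have ihr := ih (sn + 2*u) b (by omega)
    rw [show ((sn + 2*u : Nat) : Int) = ((sn:Int) + ((2*u - 1 : Nat) : Int)) + 1 by push_cast; omega] at ihr
    rw [show ((sn:Int) + ((2*u - 1 : Nat) : Int)) + 1 + (2:Int)^k - 2 = (sn:Int) + 4 * (u:Int) - 2 by omega, h2k] at ihr
    rw [ihl, ihr]
    have hslen : ((b.drop sn).take (4*u - 1)).length = 4*u - 1 := by simp; omega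
    have hB := checkB_step ((b.drop sn).take (4*u - 1)) (by omega)
    rw [hslen, show (4*u - 1) / 2 = 2*u - 1 by omega] at hB
    rw [List.take_take, show min (2*u - 1) (4*u - 1) = 2*u - 1 by omega] at hB
    rw [show (2*u - 1) + 1 = 2*u by omega] at hB
    rw [List.drop_take, List.drop_drop, show 4*u - 1 - 2*u = 2*u - 1 by omega] at hB
    have hll : ((b.drop sn).take (2*u - 1)).length = 2*u - 1 := by simp; omega
    have hrl : ((b.drop (sn + 2*u)).take (2*u - 1)).length = 2*u - 1 := by simp; omega
    rw [hll, hrl, show (2*u - 1) / 2 = u - 1 by omega] at hB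
    rw [PySem.List.pyGet?_natCast, PySem.List.pyGet?_natCast, PySem.List.pyGet?_natCast] at hB
    rw [sub_getElem? b sn (4*u - 1) (2*u - 1) (by omega), sub_getElem? b sn (2*u - 1) (u - 1) (by omega),
        sub_getElem? b (sn + 2*u) (2*u - 1) (u - 1) (by omega)] at hB
    rw [show sn + 2*u + (u - 1) = sn + (3*u - 1) by omega] at hB
    rw [hB]
    clear ih ihl ihr hB hm hnlm hnrm hslen hll hrl
    cases hM : (b[sn + (2*u - 1)]? == some '1') <;>
      cases hL : (b[sn + (u - 1)]? == some '1') <;>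
        cases hR : (b[sn + (3*u - 1)]? == some '1') <;> simp_all

lemma top (b : List Char) (hb : ∃ k, 1 ≤ k ∧ b.length + 1 = 2 ^ k) :
    loopA b [(0, PySem.Int.floordiv (PySem.List.len b) 2, PySem.List.len b - 1)] b.length = checkB b := by
  obtain ⟨k, hk1, hbl⟩ := hb
  obtain ⟨t, ht1, h2t⟩ : ∃ t, 1 ≤ t ∧ 2 ^ k = 2 * t := by
    refine ⟨2 ^ (k - 1), Nat.one_le_two_pow, ?_⟩
    rw [← pow_succ']; congr 1; omega
  have hL : b.length = 2 * t - 1 := by omega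
  have hm : PySem.Int.floordiv (PySem.List.len b) 2 = ((t : Int) - 1) := by
    rw [PySem.List.len_eq]
    exact fdiv2 _ _ (by omega)
  have hm' : PySem.Int.floordiv ((0 : Int) + ((PySem.List.len b) - 1)) 2 = ((t : Int) - 1) := by
    rw [PySem.List.len_eq]
    exact fdiv2 _ _ (by omega)
  have hinv : invQ [(0, PySem.Int.floordiv (PySem.List.len b) 2, PySem.List.len b - 1)] := by
    intro x hx
    simp only [List.mem_singleton] at hx
    subst hx
    refine ⟨by simp only; rw [hm, hm'], by simp only [PySem.List.len_eq]; omega⟩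
  have hcost : sumCost [(0, PySem.Int.floordiv (PySem.List.len b) 2, PySem.List.len b - 1)] ≤ b.length := by
    simp only [sumCost, List.map_cons, List.map_nil, List.sum_cons, List.sum_nil]
    have := costA_le 0 (PySem.List.len b - 1) (by simp only [PySem.List.len_eq]; omega)
    simp only [PySem.List.len_eq] at this ⊢
    omega
  rw [loopA_eq_all b.length b _ hinv hcost]
  simp only [List.all_cons, List.all_nil, Bool.and_true]
  rcases Nat.lt_or_ge k 2 with hk2 | hk2
  · -- k = 1 : the whole string is one node
    have hb1 : b.length = 1 := by interval_cases k; omega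
    obtain ⟨c, rfl⟩ := List.length_eq_one_iff.mp hb1
    rw [checkB_small _ (by simp)]
    rw [goodA]
    rw [if_neg (by simp only [PySem.List.len_eq]; simp)]
    have hz : PySem.List.len [c] - 1 = 0 := by simp [PySem.List.len_eq]
    rw [hz]
    have h0 : PySem.Int.floordiv ((0 : Int) + 0) 2 = 0 := fdiv2 _ _ (by omega)
    rw [h0, condA]
    have hn1 : PySem.Int.floordiv ((0 : Int) + 0 - 1) 2 = -1 := fdiv2 _ _ (by omega)
    have hn2 : PySem.Int.floordiv ((0 : Int) + 0 + 1) 2 = 0 := fdiv2 _ _ (by omega)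
    rw [hn1, hn2, PySem.List.pyGet?_neg_one, PySem.List.pyGet?_zero]
    simp only [List.getLast?_singleton, List.getElem?_cons_zero]
    simp
  · -- k ≥ 2 : bridge at the root
    have hlen0 : 0 + (2 ^ k - 1) ≤ b.length := by omega
    have hbr := bridge k hk2 0 b hlen0
    have h2kI : ((2 : Int)) ^ k = ((2 ^ k : Nat) : Int) := by push_cast; ring
    rw [show ((0 : Nat) : Int) + (2 : Int) ^ k - 2 = PySem.List.len b - 1 by
      rw [PySem.List.len_eq, h2kI]; omega] at hbr
    rw [List.drop_zero, List.take_of_length_le (by omega)] at hbr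
    rw [show ((0 : Nat) : Int) = (0 : Int) by norm_num] at hbr
    exact hbr

lemma fullLen_spec (bn n : Nat) (hn : ∃ j, 1 ≤ j ∧ n + 1 = 2 ^ j) :
    (∃ k, 1 ≤ k ∧ fullLen bn n + 1 = 2 ^ k) ∧ bn ≤ fullLen bn n := by
  fun_induction fullLen bn n with
  | case1 n hlt ih =>
    obtain ⟨j, hj1, hj⟩ := hn
    exact ih ⟨j + 1, by omega, by rw [pow_succ]; omega⟩
  | case2 n hlt => exact ⟨hn, by omega⟩

lemma foldl_prepend_len (l : List Int) (b : List Char) :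
    (l.foldl (fun acc _ => '0' :: acc) b).length = l.length + b.length := by
  induction l generalizing b with
  | nil => simp
  | cons x xs ih => simp only [List.foldl_cons, ih, List.length_cons]; omega

lemma mkFull_len (binary : List Char) :
    ∃ k, 1 ≤ k ∧ (mkFull binary).length + 1 = 2 ^ k := by
  obtain ⟨hex, hge⟩ := fullLen_spec binary.length 1 ⟨1, by omega, by norm_num⟩
  obtain ⟨k, hk1, hk⟩ := hex
  refine ⟨k, hk1, ?_⟩
  unfold mkFull
  rw [foldl_prepend_len, PySem.List.length_pyRange_one]
  omega

lemma per_number (number : Int) :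
    (if loopA (toFull number)
        [(0, PySem.Int.floordiv (PySem.List.len (toFull number)) 2, PySem.List.len (toFull number) - 1)]
        (toFull number).length then (1 : Int) else 0)
      = (if checkB (toFull number) then 1 else 0) := by
  have h : ∃ k, 1 ≤ k ∧ (toFull number).length + 1 = 2 ^ k := by
    unfold toFull; exact mkFull_len _
  rw [top _ h]

-- ===== VERDICT (by name: the statement is the Claim_ definition above) =====
theorem solution_spec : Claim_equal_solution := by
  intro numbers _
  show _ = _
  unfold solution solution_alt
  rw [PySem.List.foldl_append_singleton_eq_map]
  exact List.map_congr_left (fun n _ => per_number n)
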